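-- pv_equiv track=rewrite | github.com/GundalaNikhil/DSA | dsa-problems/Greedy/solutions/python/GRD-002-lab-kit-distribution.py | distribute_kits
-- ===== SOURCE A (Python) =====
-- import heapq
--
-- def distribute_kits(k: int, m: int, quantities: list) -> tuple:
--     # Python's heapq is a min-heap. We push negative values to simulate max-heap.
--     pq = []
--     total_kits = 0
--
--     for q in quantities:
--         if q > 0:
--             heapq.heappush(pq, -q)
--             total_kits += q
--
--     fulfilled = min(m, total_kits)
--     to_distribute = fulfilled
--
--     while to_distribute > 0 and pq:
--         # Pop largest (most negative)
--         max_q = -heapq.heappop(pq)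
--         max_q -= 1
--         to_distribute -= 1
--
--         if max_q > 0:
--             heapq.heappush(pq, -max_q)
--
--     # Remaining types in heap are those > 0
--     remaining_types = len(pq)
--     zeroed_types = k - remaining_types
--
--     return (fulfilled, zeroed_types)
-- ===== SOURCE B (Python) =====
-- def distribute_kits(k: int, m: int, quantities: list) -> tuple:
--     # Closed form: greedy max-decrement never zeroes a type until all
--     # positive quantities have been levelled down to 1, so after removing
--     # `fulfilled` units the number of still-positive types is
--     # min(count of positives, total - fulfilled).
--     total = 0
--     n = 0
--     for q in quantities:
--         if q > 0:
--             total += q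
--             n += 1
--     fulfilled = min(m, total)
--     remaining = min(n, total - fulfilled)
--     return (fulfilled, k - remaining)
-- ===== Notes on version B (the rewrite author's own statement) =====
-- stated objective: faster
-- what changed: Replaced the heap-based one-unit-at-a-time simulation by a single counting pass plus the closed form min(positive-count, total - fulfilled) for the surviving types.
import Mathlib
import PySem

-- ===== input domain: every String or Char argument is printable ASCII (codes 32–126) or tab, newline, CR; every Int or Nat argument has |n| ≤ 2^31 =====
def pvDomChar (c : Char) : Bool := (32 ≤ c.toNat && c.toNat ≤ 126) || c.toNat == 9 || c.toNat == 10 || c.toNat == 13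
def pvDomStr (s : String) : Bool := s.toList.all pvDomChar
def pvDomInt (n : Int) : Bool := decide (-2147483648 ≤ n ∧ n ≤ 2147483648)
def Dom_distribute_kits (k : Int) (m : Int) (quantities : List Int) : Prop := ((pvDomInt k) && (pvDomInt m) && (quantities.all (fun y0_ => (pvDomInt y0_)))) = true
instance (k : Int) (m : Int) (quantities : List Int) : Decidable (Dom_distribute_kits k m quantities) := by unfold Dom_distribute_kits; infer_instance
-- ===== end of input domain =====

-- B replaces A's heap-driven one-unit-at-a-time simulation by the closed form
-- min(count of positives, total - fulfilled) for the remaining types (objective: faster).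

-- ===== PORT A =====
-- The heap pq is modelled as the list of its elements: heappush appends, and
-- heappop removes the minimum value (exact: the only observables A reads from
-- heapq are the popped minimum and the heap's length, which depend only on the
-- multiset of contents).
def pvLoopA : List Int → Nat → List Int
  | pq, 0 => pq
  | pq, t + 1 =>
    match pq.min? with
    | none => pq                       -- while-condition `pq` is false: heap empty
    | some e =>
      -- max_q = -heappop(pq); max_q -= 1; push -max_q back if positive
      let maxq := -e - 1
      let pq' := pq.erase e
      pvLoopA (if maxq > 0 then pq' ++ [-maxq] else pq') t

def distribute_kits (k : Int) (m : Int) (quantities : List Int) : List Int :=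
  let st := quantities.foldl
    (fun (st : List Int × Int) q => if q > 0 then (st.1 ++ [-q], st.2 + q) else st)
    ([], 0)
  let fulfilled := min m st.2
  -- `while to_distribute > 0 and pq:` — to_distribute counts down from fulfilled,
  -- so the loop runs at most fulfilled.toNat iterations (0 if fulfilled ≤ 0).
  let pq := pvLoopA st.1 fulfilled.toNat
  [fulfilled, k - pq.length]

-- ===== PORT B =====
def distribute_kits_alt (k : Int) (m : Int) (quantities : List Int) : List Int :=
  let st := quantities.foldl
    (fun (st : Int × Int) q => if q > 0 then (st.1 + q, st.2 + 1) else st)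
    (0, 0)
  let fulfilled := min m st.1
  let remaining := min st.2 (st.1 - fulfilled)
  [fulfilled, k - remaining]

-- ===== PRECONDITION & SPEC =====
def Spec_distribute_kits (k : Int) (m : Int) (quantities : List Int) (out : List Int) : Prop := out = distribute_kits_alt k m quantities
instance (k : Int) (m : Int) (quantities : List Int) (out : List Int) : Decidable (Spec_distribute_kits k m quantities out) := by unfold Spec_distribute_kits; infer_instance

-- ===== CLAIM (what is proved, stated in full; the proofs are below) =====
def Claim_equal_distribute_kits : Prop := ∀ (k : Int) (m : Int) (quantities : List Int), Dom_distribute_kits k m quantities → Spec_distribute_kits k m quantities (distribute_kits k m quantities)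

-- ===== LEMMAS AND PROOFS =====

-- A list all of whose elements are -1 sums to minus its length.
theorem pv_sum_all_neg_one (l : List Int) (h : ∀ x ∈ l, x = -1) :
    l.sum = -(l.length : Int) := by
  induction l with
  | nil => simp
  | cons a l ih =>
    have := h a (List.mem_cons_self ..)
    have := ih (fun x hx => h x (List.mem_cons_of_mem _ hx))
    simp only [List.sum_cons, List.length_cons]
    push_cast
    omega

-- Every element of a list of integers < 0 contributes at most -1 to the sum.
theorem pv_sum_le_neg_length (l : List Int) (h : ∀ x ∈ l, x < 0) :
    l.sum ≤ -(l.length : Int) := by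
  induction l with
  | nil => simp
  | cons a l ih =>
    have ha := h a (List.mem_cons_self ..)
    have := ih (fun x hx => h x (List.mem_cons_of_mem _ hx))
    simp only [List.sum_cons, List.length_cons]
    push_cast
    omega

-- Core invariant of A's heap loop: with only negative elements and enough
-- remaining total, the number of survivors is min(length, total - t).
theorem pv_loopA_length (t : Nat) : ∀ (pq : List Int), (∀ x ∈ pq, x < 0) →
    (t : Int) ≤ -pq.sum →
    ((pvLoopA pq t).length : Int) = min (pq.length : Int) (-pq.sum - t) := by
  induction t with
  | zero =>
    intro pq hneg _
    have := pv_sum_le_neg_length pq hneg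
    simp [pvLoopA]
    omega
  | succ t ih =>
    intro pq hneg ht
    have hsum := pv_sum_le_neg_length pq hneg
    have hpos : 0 < -pq.sum := by push_cast at ht ⊢; omega
    have hne : pq ≠ [] := by rintro rfl; simp at hpos
    obtain ⟨e, he⟩ : ∃ e, pq.min? = some e :=
      Option.ne_none_iff_exists'.mp (by simpa using List.min?_eq_none_iff.not.mpr (by simpa using hne))
    obtain ⟨hmem, hle⟩ := List.min?_eq_some_iff.mp he
    have hperm := List.perm_cons_erase hmem
    have hsumE : pq.sum = e + (pq.erase e).sum := by
      simpa using hperm.sum_eq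
    have hlenE : (pq.erase e).length + 1 = pq.length := by
      simpa using hperm.length_eq.symm
    have hnegE : ∀ x ∈ pq.erase e, x < 0 :=
      fun x hx => hneg x (List.mem_of_mem_erase hx)
    have heneg : e < 0 := hneg e hmem
    simp only [pvLoopA, he]
    by_cases hbig : -e - 1 > 0
    · -- e ≤ -2 : element survives, pushed back one smaller
      simp only [if_pos hbig]
      have hsum' : (pq.erase e ++ [-(-e - 1)]).sum = pq.sum + 1 := by
        simp [List.sum_append, hsumE]; ring
      have hlen' : (pq.erase e ++ [-(-e - 1)]).length = pq.length := by
        simp [List.length_append]; omega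
      have hneg' : ∀ x ∈ pq.erase e ++ [-(-e - 1)], x < 0 := by
        intro x hx
        rcases List.mem_append.mp hx with hx | hx
        · exact hnegE x hx
        · simp at hx; omega
      rw [ih _ hneg' (by rw [hsum']; push_cast at ht ⊢; omega)]
      rw [hsum', hlen']
      push_cast; omega
    · -- e = -1 : the minimum is -1, so every element is -1 and one type is zeroed
      have he1 : e = -1 := by omega
      have hall : ∀ x ∈ pq, x = -1 := fun x hx => by
        have := hle x hx; have := hneg x hx; omega
      have hsumAll : pq.sum = -(pq.length : Int) := pv_sum_all_neg_one pq hall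
      have hsumE' : (pq.erase e).sum = -((pq.erase e).length : Int) := by
        have : pq.sum = e + (pq.erase e).sum := hsumE
        push_cast at hlenE ⊢
        omega
      simp only [if_neg hbig]
      rw [ih _ hnegE (by rw [hsumE']; push_cast at ht hlenE ⊢; omega)]
      rw [hsumE']
      push_cast at hlenE ht ⊢
      omega

-- Relates A's accumulator (negated heap contents, running total) with B's
-- accumulator (running total, count of positives) along the shared input scan.
theorem pv_fold_rel (qs : List Int) : ∀ (pq : List Int) (tot n : Int),
    pq.sum = -tot → (pq.length : Int) = n → (∀ x ∈ pq, x < 0) →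
    (qs.foldl (fun (st : List Int × Int) q => if q > 0 then (st.1 ++ [-q], st.2 + q) else st) (pq, tot)).1.sum
      = -(qs.foldl (fun (st : Int × Int) q => if q > 0 then (st.1 + q, st.2 + 1) else st) (tot, n)).1
    ∧ ((qs.foldl (fun (st : List Int × Int) q => if q > 0 then (st.1 ++ [-q], st.2 + q) else st) (pq, tot)).1.length : Int)
      = (qs.foldl (fun (st : Int × Int) q => if q > 0 then (st.1 + q, st.2 + 1) else st) (tot, n)).2
    ∧ (qs.foldl (fun (st : List Int × Int) q => if q > 0 then (st.1 ++ [-q], st.2 + q) else st) (pq, tot)).2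
      = (qs.foldl (fun (st : Int × Int) q => if q > 0 then (st.1 + q, st.2 + 1) else st) (tot, n)).1
    ∧ ∀ x ∈ (qs.foldl (fun (st : List Int × Int) q => if q > 0 then (st.1 ++ [-q], st.2 + q) else st) (pq, tot)).1, x < 0 := by
  induction qs with
  | nil => intro pq tot n h1 h2 h3; exact ⟨h1, h2, rfl, h3⟩
  | cons q qs ih =>
    intro pq tot n h1 h2 h3
    simp only [List.foldl_cons]
    by_cases hq : q > 0
    · simp only [if_pos hq]
      refine ih (pq ++ [-q]) (tot + q) (n + 1) ?_ ?_ ?_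
      · simp [List.sum_append, h1]; ring
      · simp [List.length_append]; omega
      · intro x hx
        rcases List.mem_append.mp hx with hx | hx
        · exact h3 x hx
        · simp at hx; omega
    · simp only [if_neg hq]
      exact ih pq tot n h1 h2 h3

-- ===== VERDICT (by name: the statement is the Claim_ definition above) =====
theorem distribute_kits_spec : Claim_equal_distribute_kits := by
  intro k m quantities _
  unfold Spec_distribute_kits distribute_kits distribute_kits_alt
  obtain ⟨h1, h2, h3, h4⟩ := pv_fold_rel quantities [] 0 0 (by simp) (by simp) (by simp)
  set stA := quantities.foldl (fun (st : List Int × Int) q => if q > 0 then (st.1 ++ [-q], st.2 + q) else st) ([], 0) with hA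
  set stB := quantities.foldl (fun (st : Int × Int) q => if q > 0 then (st.1 + q, st.2 + 1) else st) ((0 : Int), (0 : Int)) with hB
  have hlen0 : (0 : Int) ≤ stB.2 := by rw [← h2]; positivity
  have hsum0 : stB.2 ≤ stB.1 := by
    have := pv_sum_le_neg_length stA.1 h4
    omega
  show [min m stA.2, k - ((pvLoopA stA.1 (min m stA.2).toNat).length : Int)]
      = [min m stB.1, k - min stB.2 (stB.1 - min m stB.1)]
  have hful : min m stA.2 = min m stB.1 := by rw [h3]
  have hle : ((min m stB.1).toNat : Int) ≤ -stA.1.sum := by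
    rw [h1]; omega
  rw [hful, pv_loopA_length _ _ h4 hle, h1, h2]
  have hmin : min stB.2 (stB.1 - ((min m stB.1).toNat : Int)) = min stB.2 (stB.1 - min m stB.1) := by
    omega
  rw [← hmin]
  ring_nf
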